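-- pv_equiv track=rewrite | github.com/epicerieledetour/ledetour-products | scripts/csv2json.py | els
-- ===== SOURCE A (Python) =====
-- def els(row):
--     it = iter(row)
--     try:
--         while True:
--             fr, en = next(it), next(it)
--             yield fr, en
--             next(it)
--             next(it)
--             next(it)
--     except StopIteration:
--         pass
-- ===== SOURCE B (Python) =====
-- def els(row):
--     fr = None
--     for i, x in enumerate(row):
--         r = i % 5
--         if r == 0:
--             fr = x
--         elif r == 1:
--             yield fr, x
-- ===== Notes on version B (the rewrite author's own statement) =====
-- stated objective: idiomatic
-- what changed: Replaces A's four-next() ladder with StopIteration guard by a single enumerate loop that stashes the element at positions i%5==0 and yields the pair at i%5==1.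
import Mathlib
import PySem

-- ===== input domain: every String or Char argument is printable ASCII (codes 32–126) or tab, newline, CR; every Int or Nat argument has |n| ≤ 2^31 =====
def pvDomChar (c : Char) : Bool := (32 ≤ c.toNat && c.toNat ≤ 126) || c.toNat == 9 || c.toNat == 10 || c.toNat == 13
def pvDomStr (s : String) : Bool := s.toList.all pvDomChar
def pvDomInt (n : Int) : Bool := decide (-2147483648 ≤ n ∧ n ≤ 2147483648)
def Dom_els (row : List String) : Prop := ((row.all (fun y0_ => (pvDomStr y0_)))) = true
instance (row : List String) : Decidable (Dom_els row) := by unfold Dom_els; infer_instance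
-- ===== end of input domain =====

-- B replaces A's four-next() ladder with a single enumerate loop (stash at i%5==0, yield at i%5==1); idiomatic, same cost.


-- ===== PORT A =====
-- while True: fr, en = next(it), next(it); yield fr, en; next(it); next(it); next(it)
-- (StopIteration anywhere ends the generator; the three skipped nexts are rest.drop 3)
def els : List String → List (String × String)
  | fr :: en :: rest => (fr, en) :: els (rest.drop 3)
  | _ => []
termination_by row => row.length
decreasing_by simp [List.length_drop]; omega

-- ===== PORT B =====
-- loop body of B: r = i % 5; if r == 0: fr = x; elif r == 1: yield fr, x
-- (fr is always set before a yield, since i%5==1 is preceded by i-1 with (i-1)%5==0;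
--  the getD "" default is therefore never used)
def elsStep (st : Option String × List (String × String)) (p : Int × String) :
    Option String × List (String × String) :=
  if p.1 % 5 = 0 then (some p.2, st.2)
  else if p.1 % 5 = 1 then (st.1, (st.1.getD "", p.2) :: st.2)
  else st

def els_alt (row : List String) : List (String × String) :=
  (((PySem.List.enumerate row).foldl elsStep (none, [])).2).reverse

-- ===== PRECONDITION & SPEC =====
def Spec_els (row : List String) (out : List (String × String)) : Prop := out = els_alt row
instance (row : List String) (out : List (String × String)) : Decidable (Spec_els row out) := by unfold Spec_els; infer_instance

-- ===== CLAIM (what is proved, stated in full; the proofs are below) =====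
def Claim_equal_els : Prop := ∀ (row : List String), Dom_els row → Spec_els row (els row)

-- ===== LEMMAS AND PROOFS =====

-- the fold over enumerate starting at any offset ≡ 0 (mod 5) accumulates exactly els, reversed
theorem els_fold (row : List String) (off : Int) (h0 : 0 ≤ off) (h5 : off % 5 = 0)
    (fr0 : Option String) (acc : List (String × String)) :
    ((PySem.List.enumerate row off).foldl elsStep (fr0, acc)).2 = (els row).reverse ++ acc := by
  match row with
  | [] => simp [PySem.List.enumerate_nil, els]
  | [x] =>
    simp [PySem.List.enumerate_cons, PySem.List.enumerate_nil, elsStep, h5, els]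
  | fr :: en :: rest =>
    have h1 : (off + 1) % 5 = 1 := by omega
    have h2 : (off + 1 + 1) % 5 = 2 := by omega
    have h3 : (off + 1 + 1 + 1) % 5 = 3 := by omega
    have h4 : (off + 1 + 1 + 1 + 1) % 5 = 4 := by omega
    match rest with
    | [] =>
      simp [PySem.List.enumerate_cons, PySem.List.enumerate_nil, elsStep, h5, h1, els]
    | [a] =>
      simp [PySem.List.enumerate_cons, PySem.List.enumerate_nil, elsStep, h5, h1, h2, els]
    | [a, b] =>
      simp [PySem.List.enumerate_cons, PySem.List.enumerate_nil, elsStep, h5, h1, h2, h3, els]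
    | a :: b :: c :: rest' =>
      have ih := els_fold rest' (off + 1 + 1 + 1 + 1 + 1) (by omega) (by omega)
        (some fr) ((fr, en) :: acc)
      simp only [PySem.List.enumerate_cons, List.foldl_cons]
      simp only [elsStep, h5, h1, h2, h3, h4]
      norm_num
      rw [ih]
      simp [els]
termination_by row.length
decreasing_by simp; omega

-- ===== VERDICT (by name: the statement is the Claim_ definition above) =====
theorem els_spec : Claim_equal_els := by
  intro row _
  unfold Spec_els els_alt
  rw [els_fold row 0 (by omega) (by omega)]
  simp
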